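-- pv_equiv track=rewrite | github.com/danteacastro/ICCSFlux | services/daq_service/capabilities.py | _normalize_product_type
-- ===== SOURCE A (Python) =====
-- from typing import Dict, FrozenSet, Optional, Tuple
--
-- def _normalize_product_type(s: Optional[str]) -> str:
--     """Canonicalize an NI module type string.
--
--     Accepts: ``'NI-9213'``, ``'NI 9213'``, ``'ni-9213'``, ``'9213'``, etc.
--     Returns: ``'NI-9213'`` (canonical) or ``''`` if input is None/empty.
--
--     Mirrors the normalization in ``terminal_config.is_module_differential_only``
--     and ``hardware_reader._module_needs_high_speed_adc`` so all three layers
--     agree on what "the same module" looks like.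
--     """
--     if not s:
--         return ""
--     n = s.strip()
--     if not n:
--         # All-whitespace input — treat as empty rather than letting it
--         # collapse to a bare "NI-" prefix below.
--         return ""
--     n = n.upper().replace(" ", "-").replace("_", "-")
--     while "--" in n:
--         n = n.replace("--", "-")
--     if not n.startswith("NI-"):
--         n = f"NI-{n}"
--     return n
-- ===== SOURCE B (Python) =====
-- def _normalize_product_type(s):
--     """Canonicalize an NI module type string (single-pass scan instead of
--     chained replace() calls plus a while-loop dedup)."""
--     if not s:
--         return ""
--     t = s.strip()
--     if not t:
--         return ""
--     out = []
--     i = 0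
--     n = len(t)
--     while i < n:
--         c = t[i]
--         if c in " _-":
--             out.append("-")
--             i += 1
--             while i < n and t[i] in " _-":
--                 i += 1
--         else:
--             out.append(c.upper())
--             i += 1
--     r = "".join(out)
--     return r if r.startswith("NI-") else "NI-" + r
-- ===== Notes on version B (the rewrite author's own statement) =====
-- stated objective: alternative
-- what changed: Replaces the upper() pass, the two chained replace() passes and the iterated dash-collapsing fixpoint loop by a single left-to-right scan that emits one dash per run of space/underscore/dash characters and uppercases every other character in place.
import Mathlib
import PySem

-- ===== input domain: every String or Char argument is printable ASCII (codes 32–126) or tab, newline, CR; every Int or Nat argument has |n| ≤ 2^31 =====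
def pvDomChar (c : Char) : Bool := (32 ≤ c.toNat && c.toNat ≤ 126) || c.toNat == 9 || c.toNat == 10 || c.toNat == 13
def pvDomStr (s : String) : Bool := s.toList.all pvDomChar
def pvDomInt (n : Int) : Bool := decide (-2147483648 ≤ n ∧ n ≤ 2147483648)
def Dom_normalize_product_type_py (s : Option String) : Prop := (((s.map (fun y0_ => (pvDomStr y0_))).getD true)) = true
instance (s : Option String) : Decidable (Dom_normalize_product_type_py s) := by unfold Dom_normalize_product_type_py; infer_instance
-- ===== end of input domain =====

-- B replaces A's upper()+chained replace() passes and the iterated dash-collapsing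
-- fixpoint loop by a single left-to-right scan emitting one dash per run of
-- space/underscore/dash; same return value on every input (alternative decomposition,
-- no speed claim).

-- ===== PORT A =====
-- pvRep2 is NOT part of the port: it is the specification of one pass of
-- n.replace("--", "-"), needed by name in pvLoopA's termination proof.
def pvRep2 : List Char → List Char
  | [] => []
  | [c] => [c]
  | a :: b :: t => if a = '-' ∧ b = '-' then '-' :: pvRep2 t else a :: pvRep2 (b :: t)

theorem pvRep2_len_le (l : List Char) : (pvRep2 l).length ≤ l.length := by
  induction l using pvRep2.induct with
  | case1 => simp [pvRep2]
  | case2 c => simp [pvRep2]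
  | case3 a b t hab ih => simp only [pvRep2, if_pos hab]; simp; omega
  | case4 a b t hab ih =>
    simp only [pvRep2, if_neg (by tauto : ¬(a = '-' ∧ b = '-'))]
    simp at ih ⊢; omega

theorem pvGo_dd (fuel : Nat) : ∀ (s acc : List Char), s.length ≤ fuel →
    PySem.Chars.replace.go ['-', '-'] ['-'] fuel s acc = acc.reverse ++ pvRep2 s := by
  induction fuel with
  | zero =>
    intro s acc h
    have : s = [] := List.eq_nil_of_length_eq_zero (Nat.le_zero.mp h)
    subst this; simp [PySem.Chars.replace.go, pvRep2]
  | succ fuel ih =>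
    intro s acc h
    match s with
    | [] => simp [PySem.Chars.replace.go, pvRep2]
    | c :: t =>
      rw [PySem.Chars.replace.go]
      simp only [List.length_cons] at h
      by_cases hp : List.isPrefixOf ['-', '-'] (c :: t) = true
      · match t with
        | [] => exact absurd (List.isPrefixOf_iff_prefix.mp hp).length_le (by simp)
        | b :: t' =>
          obtain ⟨u, hu⟩ := List.isPrefixOf_iff_prefix.mp hp
          injection hu with h1 h2; injection h2 with h3 h4
          subst h1; subst h3
          rw [if_pos hp]
          have hdrop : List.drop (['-', '-'] : List Char).length ('-' :: '-' :: t') = t' := rfl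
          rw [hdrop, ih t' _ (by simp at h ⊢; omega)]
          simp [pvRep2]
      · rw [if_neg hp]
        rw [ih t (c :: acc) (by omega)]
        match t with
        | [] => simp [pvRep2]
        | b :: t' =>
          have hcb : ¬(c = '-' ∧ b = '-') := by
            rintro ⟨rfl, rfl⟩
            exact hp (List.isPrefixOf_iff_prefix.mpr ⟨t', rfl⟩)
          simp only [pvRep2, if_neg hcb]
          simp

theorem pvReplace_dd (l : List Char) :
    PySem.Chars.replace l ['-', '-'] ['-'] = pvRep2 l := by
  rw [PySem.Chars.replace, if_neg (by simp)]
  exact pvGo_dd l.length l [] le_rfl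

theorem pvRep2_len_lt (l : List Char) (h : ['-', '-'] <:+: l) :
    (pvRep2 l).length < l.length := by
  induction l using pvRep2.induct with
  | case1 => simp at h
  | case2 c => exact absurd h.length_le (by simp)
  | case3 a b t hab ih =>
    have := pvRep2_len_le t
    simp only [pvRep2, if_pos hab]
    simp; omega
  | case4 a b t hab ih =>
    have hni : ¬(a = '-' ∧ b = '-') := by tauto
    rw [List.infix_cons_iff] at h
    rcases h with h | h
    · obtain ⟨u, hu⟩ := h
      injection hu with h1 h2; injection h2 with h3 h4
      exact absurd ⟨h1.symm, h3.symm⟩ hni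
    · have := ih h
      simp only [pvRep2, if_neg hni]
      simp at this ⊢; omega

-- the while "--" in n: n = n.replace("--", "-") loop of A
def pvLoopA (l : List Char) : List Char :=
  if PySem.Chars.isIn ['-', '-'] l then pvLoopA (PySem.Chars.replace l ['-', '-'] ['-']) else l
termination_by l.length
decreasing_by
  rw [pvReplace_dd]
  exact pvRep2_len_lt l ((PySem.Chars.isIn_iff_infix _ _).mp (by assumption))

def normalize_product_type_py (s : Option String) : String :=
  match s with
  | none => ""                                   -- `if not s` (None case)
  | some v =>
    if v.toList.isEmpty then ""                  -- `if not s` (empty-string case)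
    else
      let n := PySem.Chars.strip v.toList        -- n = s.strip()
      if n.isEmpty then ""                       -- `if not n`
      else
        -- n = n.upper().replace(" ", "-").replace("_", "-")
        let n := PySem.Chars.replace (PySem.Chars.replace (PySem.Chars.upper n) [' '] ['-']) ['_'] ['-']
        let n := pvLoopA n                       -- while "--" in n: n = n.replace("--", "-")
        -- if not n.startswith("NI-"): n = f"NI-{n}"
        let n := if PySem.Chars.startswith n ['N', 'I', '-'] then n else ['N', 'I', '-'] ++ n
        String.mk n

-- ===== PORT B =====
def pvClass (c : Char) : Bool := c == ' ' || c == '_' || c == '-'   -- `c in " _-"`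

-- the outer while-loop of B: one '-' per run of " _-" chars (inner while = dropWhile),
-- other characters uppercased in place
def pvSub : List Char → List Char
  | [] => []
  | c :: t =>
    if pvClass c then '-' :: pvSub (t.dropWhile pvClass)
    else PySem.Chars.upperChar c :: pvSub t
termination_by l => l.length
decreasing_by
  · simpa using Nat.lt_succ_of_le (List.length_dropWhile_le _ _)
  · simp

def normalize_product_type_py_alt (s : Option String) : String :=
  match s with
  | none => ""
  | some v =>
    if v.toList.isEmpty then ""
    else
      let t := PySem.Chars.strip v.toList        -- t = s.strip()
      if t.isEmpty then ""
      else
        let r := pvSub t                         -- the scan loop, out joined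
        if PySem.Chars.startswith r ['N', 'I', '-'] then String.mk r
        else String.mk (['N', 'I', '-'] ++ r)

-- ===== PRECONDITION & SPEC =====
def Spec_normalize_product_type_py (s : Option String) (out : String) : Prop := out = normalize_product_type_py_alt s
instance (s : Option String) (out : String) : Decidable (Spec_normalize_product_type_py s out) := by unfold Spec_normalize_product_type_py; infer_instance

-- ===== CLAIM (what is proved, stated in full; the proofs are below) =====
def Claim_equal_normalize_product_type_py : Prop := ∀ (s : Option String), Dom_normalize_product_type_py s → Spec_normalize_product_type_py s (normalize_product_type_py s)

-- ===== LEMMAS AND PROOFS =====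

-- one pass of str.replace with a single-character pattern is a map
theorem pvGo_single (c : Char) (fuel : Nat) : ∀ (s acc : List Char), s.length ≤ fuel →
    PySem.Chars.replace.go [c] ['-'] fuel s acc
      = acc.reverse ++ s.map (fun x => if x == c then '-' else x) := by
  induction fuel with
  | zero =>
    intro s acc h
    have : s = [] := List.eq_nil_of_length_eq_zero (Nat.le_zero.mp h)
    subst this; simp [PySem.Chars.replace.go]
  | succ fuel ih =>
    intro s acc h
    match s with
    | [] => simp [PySem.Chars.replace.go]
    | a :: t =>
      rw [PySem.Chars.replace.go]
      simp only [List.length_cons] at h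
      by_cases hp : List.isPrefixOf [c] (a :: t) = true
      · obtain ⟨u, hu⟩ := List.isPrefixOf_iff_prefix.mp hp
        injection hu with h1 h2
        subst h1
        rw [if_pos hp]
        have hdrop : List.drop ([c] : List Char).length (c :: t) = t := rfl
        rw [hdrop, ih t _ (by omega)]
        simp
      · have hac : ¬ a = c := fun he => hp (List.isPrefixOf_iff_prefix.mpr ⟨t, by simp [he]⟩)
        rw [if_neg hp, ih t (a :: acc) (by omega)]
        simp [hac]

theorem pvReplace_single (c : Char) (l : List Char) :
    PySem.Chars.replace l [c] ['-'] = l.map (fun x => if x == c then '-' else x) := by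
  rw [PySem.Chars.replace, if_neg (by simp)]
  exact pvGo_single c l.length l [] le_rfl

-- canonical form: collapse every run of consecutive '-' to a single '-'
def pvDed : List Char → List Char
  | [] => []
  | [c] => [c]
  | a :: b :: t => if a = '-' ∧ b = '-' then pvDed (b :: t) else a :: pvDed (b :: t)

theorem pvDed_cons₂ (a b : Char) (t : List Char) (h : ¬(a = '-' ∧ b = '-')) :
    pvDed (a :: b :: t) = a :: pvDed (b :: t) := by
  simp only [pvDed, if_neg h]

theorem pvDed_dd (t : List Char) : pvDed ('-' :: '-' :: t) = pvDed ('-' :: t) := by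
  simp [pvDed]

theorem pvDed_cons_of_ne (a : Char) (t : List Char) (h : a ≠ '-') :
    pvDed (a :: t) = a :: pvDed t := by
  match t with
  | [] => simp [pvDed]
  | b :: t' => exact pvDed_cons₂ a b t' (fun hx => h hx.1)

theorem pvDed_dash_cons_of_ne (b : Char) (t : List Char) (h : b ≠ '-') :
    pvDed ('-' :: b :: t) = '-' :: pvDed (b :: t) :=
  pvDed_cons₂ '-' b t (fun hx => h hx.2)

-- pvDed absorbs an inner pvDed
theorem pvDed_cons_pvDed (l : List Char) : ∀ c, pvDed (c :: pvDed l) = pvDed (c :: l) := by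
  induction l using pvDed.induct with
  | case1 => intro c; rfl
  | case2 b => intro c; simp [pvDed]
  | case3 a b t hab ih =>
    intro c
    obtain ⟨rfl, rfl⟩ := hab
    rw [pvDed_dd, ih c]
    by_cases hc : c = '-'
    · subst hc; simp [pvDed_dd]
    · rw [pvDed_cons_of_ne c _ hc, pvDed_cons_of_ne c _ hc, pvDed_dd]
  | case4 a b t hab ih =>
    intro c
    have hni : ¬(a = '-' ∧ b = '-') := by tauto
    rw [pvDed_cons₂ a b t hni]
    by_cases hca : c = '-' ∧ a = '-'
    · obtain ⟨rfl, rfl⟩ := hca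
      rw [pvDed_dd, ih '-', pvDed_dd]
    · rw [pvDed_cons₂ c a (pvDed (b :: t)) hca, ih a, pvDed_cons₂ a b t hni,
        pvDed_cons₂ c a (b :: t) hca, pvDed_cons₂ a b t hni]

-- one replace pass does not change the canonical form
theorem pvDed_pvRep2 (l : List Char) : pvDed (pvRep2 l) = pvDed l := by
  induction l using pvRep2.induct with
  | case1 => rfl
  | case2 c => rfl
  | case3 a b t hab ih =>
    obtain ⟨rfl, rfl⟩ := hab
    simp only [pvRep2]
    calc pvDed ('-' :: pvRep2 t) = pvDed ('-' :: pvDed (pvRep2 t)) := (pvDed_cons_pvDed _ _).symm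
    _ = pvDed ('-' :: pvDed t) := by rw [ih]
    _ = pvDed ('-' :: t) := pvDed_cons_pvDed _ _
    _ = pvDed ('-' :: '-' :: t) := (pvDed_dd t).symm
  | case4 a b t hab ih =>
    have hni : ¬(a = '-' ∧ b = '-') := by tauto
    simp only [pvRep2, if_neg hni]
    calc pvDed (a :: pvRep2 (b :: t)) = pvDed (a :: pvDed (pvRep2 (b :: t))) := (pvDed_cons_pvDed _ _).symm
    _ = pvDed (a :: pvDed (b :: t)) := by rw [ih]
    _ = pvDed (a :: b :: t) := pvDed_cons_pvDed _ _

-- a string with no "--" is already canonical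
theorem pvDed_of_no_dd (l : List Char) (h : ¬ (['-', '-'] <:+: l)) : pvDed l = l := by
  induction l using pvDed.induct with
  | case1 => rfl
  | case2 c => rfl
  | case3 a b t hab ih =>
    obtain ⟨rfl, rfl⟩ := hab
    exact absurd (List.IsPrefix.isInfix ⟨t, rfl⟩) h
  | case4 a b t hab ih =>
    have hni : ¬(a = '-' ∧ b = '-') := by tauto
    rw [pvDed_cons₂ a b t hni, ih (fun hi => h (hi.trans (List.suffix_cons a _).isInfix))]

-- A's fixpoint loop computes the canonical form
theorem pvLoopA_eq_pvDed (l : List Char) : pvLoopA l = pvDed l := by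
  induction l using pvLoopA.induct with
  | case1 l h ih =>
    rw [pvLoopA, if_pos h, ih, pvReplace_dd, pvDed_pvRep2]
  | case2 l h =>
    rw [pvLoopA, if_neg h]
    have := (PySem.Chars.isIn_eq_false_iff ['-', '-'] l).mp (by simpa using h)
    exact (pvDed_of_no_dd l this).symm

-- the per-character effect of A's upper + two replaces
def pvG (c : Char) : Char :=
  (fun x => if x == '_' then '-' else x) ((fun x => if x == ' ' then '-' else x) (PySem.Chars.upperChar c))

theorem pvG_of_class (c : Char) (h : pvClass c = true) : pvG c = '-' := by
  simp [pvClass] at h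
  rcases h with (h | h) | h <;> subst h <;> decide

theorem pvG_of_not_class (c : Char) (h : pvClass c = false) :
    pvG c = PySem.Chars.upperChar c ∧ PySem.Chars.upperChar c ≠ '-' := by
  simp [pvClass] at h
  obtain ⟨⟨h1, h2⟩, h3⟩ := h
  by_cases hl : PySem.Chars.islower c = true
  · have hrange : 97 ≤ c.toNat ∧ c.toNat ≤ 122 := by
      simp [PySem.Chars.islower] at hl
      obtain ⟨ha, hb⟩ := hl
      rw [Char.le_def] at ha hb
      exact ⟨ha, hb⟩
    have hval : (Char.ofNat (c.toNat - 32)).toNat = c.toNat - 32 := by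
      rw [Char.toNat_ofNat, if_pos]
      exact Or.inl (by omega)
    have hup : PySem.Chars.upperChar c = Char.ofNat (c.toNat - 32) := by
      rw [PySem.Chars.upperChar, if_pos hl]
    have hne : ∀ d : Char, Char.ofNat (c.toNat - 32) = d → d.toNat = c.toNat - 32 := by
      intro d hd; rw [← hd, hval]
    have hsp : (' ' : Char).toNat = 32 := rfl
    have hus : ('_' : Char).toNat = 95 := rfl
    have hda : ('-' : Char).toNat = 45 := rfl
    refine ⟨?_, ?_⟩
    · have h32 : ¬ (Char.ofNat (c.toNat - 32) = ' ') := fun hx => by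
        have := hne _ hx; omega
      have h95 : ¬ (Char.ofNat (c.toNat - 32) = '_') := fun hx => by
        have := hne _ hx; omega
      simp [pvG, hup, h32, h95]
    · rw [hup]
      intro hx; have := hne _ hx; omega
  · have hup : PySem.Chars.upperChar c = c := by
      rw [PySem.Chars.upperChar, if_neg hl]
    refine ⟨?_, by rw [hup]; exact h3⟩
    simp [pvG, hup, h1, h2]

-- a run of class characters after a '-' disappears in the canonical form
theorem pvDed_dash_map (t : List Char) :
    pvDed ('-' :: t.map pvG) = '-' :: pvDed ((t.dropWhile pvClass).map pvG) := by
  induction t with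
  | nil => simp [pvDed]
  | cons a t' ih =>
    by_cases ha : pvClass a = true
    · rw [List.map_cons, pvG_of_class a ha, pvDed_dd, ih, List.dropWhile_cons_of_pos ha]
    · have hne := (pvG_of_not_class a (by simpa using ha)).1
      have hnd := (pvG_of_not_class a (by simpa using ha)).2
      rw [List.dropWhile_cons_of_neg (by simpa using ha), List.map_cons,
        pvDed_dash_cons_of_ne _ _ (by rw [hne]; exact hnd)]

-- KEY: the canonical form of the mapped string is B's scan
theorem pvDed_map_eq_pvSub (l : List Char) : pvDed (l.map pvG) = pvSub l := by
  induction l using pvSub.induct with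
  | case1 => simp [pvSub, pvDed]
  | case2 c t hc ih =>
    rw [List.map_cons, pvG_of_class c hc, pvSub, if_pos hc, pvDed_dash_map, ih]
  | case3 c t hc ih =>
    have h1 := (pvG_of_not_class c (by simpa using hc)).1
    have h2 := (pvG_of_not_class c (by simpa using hc)).2
    rw [List.map_cons, pvSub, if_neg hc, pvDed_cons_of_ne _ _ (by rw [h1]; exact h2), ih, h1]

-- the two pipelines agree on the stripped, nonempty string
theorem pvPipeline (n : List Char) :
    pvLoopA (PySem.Chars.replace (PySem.Chars.replace (PySem.Chars.upper n) [' '] ['-']) ['_'] ['-'])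
      = pvSub n := by
  rw [pvReplace_single, pvReplace_single, PySem.Chars.upper, List.map_map, List.map_map,
    pvLoopA_eq_pvDed]
  exact pvDed_map_eq_pvSub n

-- ===== VERDICT (by name: the statement is the Claim_ definition above) =====
theorem normalize_product_type_py_spec : Claim_equal_normalize_product_type_py := by
  intro s _
  unfold Spec_normalize_product_type_py normalize_product_type_py normalize_product_type_py_alt
  match s with
  | none => rfl
  | some v =>
    by_cases h1 : v.toList.isEmpty
    · simp [h1]
    · simp only [h1, if_false, Bool.false_eq_true]
      by_cases h2 : (PySem.Chars.strip v.toList).isEmpty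
      · simp [h2]
      · simp only [h2, if_false, Bool.false_eq_true]
        rw [pvPipeline]
        split <;> rfl
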